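-- pv_equiv track=rewrite | github.com/nourhanadel12/binary-calculator | binary-calculator.py | sub_binary_num
-- ===== SOURCE A (Python) =====
-- def sub_binary_num(a, b):
--     # Subtracts two binary numbers represented as strings and returns the difference as a string.
--     # Make the numbers the same length by padding with leading zeros
--     if len(a) < len(b):
--         a = "0" * (len(b) - len(a)) + a
--     elif len(b) < len(a):
--         b = "0" * (len(a) - len(b)) + b
--     borrow = 0
--     subtraction = ""
--     for i in range(len(a) - 1, -1, -1):
--         diff_digits = int(a[i]) - int(b[i]) - borrow  # Calculate the difference of the current digits and borrow
--         # Handle different difference cases: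
--         if diff_digits >= 0:
--             borrow = 0
--             subtraction = str(diff_digits) + subtraction
--         else:
--             borrow = 1
--             subtraction = str(diff_digits + 2) + subtraction   # Borrow from the next digit (equivalent to adding 2 in binary)
--     return subtraction
-- ===== SOURCE B (Python) =====
-- def sub_binary_num(a, b):
--     # Closed-form modular subtraction: A's borrow loop computes (a - b) mod 2^n
--     # as an exactly n-bit string, n = max width; empty operands count as 0.
--     n = max(len(a), len(b))
--     if n == 0:
--         return ""
--     va = 0
--     for c in a:
--         va = 2 * va + "01".index(c)
--     vb = 0
--     for c in b:
--         vb = 2 * vb + "01".index(c)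
--     d = (va - vb) % (2 ** n)
--     return format(d, "0{}b".format(n))
-- ===== Notes on version B (the rewrite author's own statement) =====
-- stated objective: simpler
-- what changed: Replaces the per-digit borrow-propagation loop (with repeated string prepending) by one closed-form modular subtraction (a-b) mod 2^n rendered by fixed-width formatting.
-- outside the precondition, e.g. on sub_binary_num('2', '0'): A returns '2', B raises ValueError
import Mathlib
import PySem

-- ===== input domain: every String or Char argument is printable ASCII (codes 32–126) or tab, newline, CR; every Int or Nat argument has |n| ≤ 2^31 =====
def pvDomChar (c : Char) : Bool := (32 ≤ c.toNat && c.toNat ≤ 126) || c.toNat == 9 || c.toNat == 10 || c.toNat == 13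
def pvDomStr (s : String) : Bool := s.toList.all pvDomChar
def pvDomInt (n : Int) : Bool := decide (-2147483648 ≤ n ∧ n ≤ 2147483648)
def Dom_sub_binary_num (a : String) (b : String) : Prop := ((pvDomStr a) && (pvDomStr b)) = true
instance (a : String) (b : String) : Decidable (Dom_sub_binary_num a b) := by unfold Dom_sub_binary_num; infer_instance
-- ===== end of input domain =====

-- B replaces A's borrow-propagation loop by closed-form modular subtraction (a-b) mod 2^n, fixed-width formatted.

-- ===== PORT A =====
-- int(c) for a single digit char (Pre_ restricts to '0'/'1', where this is exact)
def pvDigit (c : Char) : Int := (c.toNat : Int) - 48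

-- the 'for i in range(len(a)-1, -1, -1)' loop: counter i+1 processes index i, state (borrow, subtraction)
def pvSubLoop (a b : List Char) : Nat → Int × List Char → Int × List Char
  | 0, st => st
  | (i+1), (borrow, sub) =>
    let diff := pvDigit (a.getD i '0') - pvDigit (b.getD i '0') - borrow
    if diff ≥ 0 then pvSubLoop a b i (0, (PySem.Int.toStr diff).toList ++ sub)
    else pvSubLoop a b i (1, (PySem.Int.toStr (diff + 2)).toList ++ sub)

def sub_binary_num (a : String) (b : String) : String :=
  let la := a.toList
  let lb := b.toList
  let la' := if la.length < lb.length then List.replicate (lb.length - la.length) '0' ++ la else la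
  let lb' := if lb.length < la.length then List.replicate (la.length - lb.length) '0' ++ lb else lb
  String.mk (pvSubLoop la' lb' la'.length (0, [])).2

-- ===== PORT B =====
-- the "va = 2*va + \"01\".index(c)" accumulation loop of B
def pvStrVal (l : List Char) : Int :=
  l.foldl (fun acc c => 2 * acc + (((PySem.List.index? ['0', '1'] c).getD 0 : Nat) : Int)) 0

-- format(d, '0{n}b') for 0 ≤ d < 2^n: width-n binary with leading zeros
def pvFmtBin : Nat → Nat → List Char
  | 0, _ => []
  | (w+1), d => pvFmtBin w (d / 2) ++ [if d % 2 = 1 then '1' else '0']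

def sub_binary_num_alt (a : String) (b : String) : String :=
  let n := max a.toList.length b.toList.length
  if n = 0 then ""
  else String.mk (pvFmtBin n (PySem.Int.mod (pvStrVal a.toList - pvStrVal b.toList) (2 ^ n)).toNat)

-- ===== PRECONDITION & SPEC =====
-- Pre_ excludes strings with a character other than '0'/'1': on non-digit characters A raises
-- ValueError, and on decimal digits 2–9 A returns junk digit strings (e.g. '2') outside the
-- binary-subtraction domain, where B raises.
def Pre_sub_binary_num (a : String) (b : String) : Prop :=
  (a.toList.all (fun c => c == '0' || c == '1') && b.toList.all (fun c => c == '0' || c == '1')) = true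
instance (a : String) (b : String) : Decidable (Pre_sub_binary_num a b) := by
  unfold Pre_sub_binary_num; infer_instance

def pvWitness_sub_binary_num : String × String := ("10", "1")

def Spec_sub_binary_num (a : String) (b : String) (out : String) : Prop := out = sub_binary_num_alt a b
instance (a : String) (b : String) (out : String) : Decidable (Spec_sub_binary_num a b out) := by unfold Spec_sub_binary_num; infer_instance

-- ===== CLAIM (what is proved, stated in full; the proofs are below) =====
def Claim_equal_sub_binary_num : Prop := ∀ (a : String) (b : String), Dom_sub_binary_num a b → Pre_sub_binary_num a b → Spec_sub_binary_num a b (sub_binary_num a b)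

-- ===== LEMMAS AND PROOFS =====

-- binary value via digit arithmetic, the common form both ports are reduced to
def pvBinVal (l : List Char) : Int := l.foldl (fun acc c => 2 * acc + ((c.toNat : Int) - 48)) 0

theorem pvStrVal_foldl_eq : ∀ (l : List Char), (∀ c ∈ l, c = '0' ∨ c = '1') → ∀ acc : Int,
    List.foldl (fun acc c => 2 * acc + (((PySem.List.index? ['0', '1'] c).getD 0 : Nat) : Int)) acc l
      = List.foldl (fun acc c => 2 * acc + ((c.toNat : Int) - 48)) acc l
  | [], _, acc => rfl
  | c :: t, h, acc => by
    have hc := h c List.mem_cons_self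
    simp only [List.foldl_cons]
    have hstep : (2 * acc + (((PySem.List.index? ['0', '1'] c).getD 0 : Nat) : Int))
        = 2 * acc + ((c.toNat : Int) - 48) := by
      rcases hc with h1 | h1 <;> subst h1 <;> norm_num <;> decide
    rw [hstep, pvStrVal_foldl_eq t (fun x hx => h x (List.mem_cons_of_mem c hx))]

theorem pvStrVal_eq (l : List Char) (h : ∀ c ∈ l, c = '0' ∨ c = '1') :
    pvStrVal l = pvBinVal l := pvStrVal_foldl_eq l h 0

theorem pvBinVal_append (l : List Char) (c : Char) :
    pvBinVal (l ++ [c]) = 2 * pvBinVal l + ((c.toNat : Int) - 48) := by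
  simp [pvBinVal]

theorem pvBinVal_zeros_prefix (k : Nat) (l : List Char) :
    pvBinVal (List.replicate k '0' ++ l) = pvBinVal l := by
  induction k with
  | zero => rfl
  | succ k ih =>
    have h0 : (('0'.toNat : Int) - 48) = 0 := by decide
    simpa [List.replicate_succ, pvBinVal, List.foldl, h0] using ih

theorem pvFmtBin_step (i : Nat) (Y r : Int) (hr : r = 0 ∨ r = 1) :
    pvFmtBin (i+1) ((2*Y + r) % (2^(i+1))).toNat
      = pvFmtBin i (Y % (2^i)).toNat ++ [if r = 1 then '1' else '0'] := by
  have h2 : (0:Int) < 2^i := by positivity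
  have hE : (0:Int) ≤ Y % (2^i) := Int.emod_nonneg Y (by omega)
  have hL : Y % (2^i) < 2^i := Int.emod_lt_of_pos Y h2
  have hp : (2:Int)^(i+1) = 2 * 2^i := by ring
  have hr0 : (0:Int) ≤ r := by rcases hr with h | h <;> omega
  have hdec : 2*Y + r = (2*(Y % (2^i)) + r) + (2^(i+1)) * (Y / (2^i)) := by
    have h := Int.ediv_add_emod Y (2^i)
    rw [hp]; linarith
  have hm : (2*Y + r) % (2^(i+1)) = 2 * (Y % (2^i)) + r := by
    rw [hdec, Int.add_mul_emod_self_left]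
    exact Int.emod_eq_of_lt (by omega) (by omega)
  rw [hm]
  have he : (2 * (Y % (2^i)) + r).toNat = 2 * (Y % (2^i)).toNat + r.toNat := by omega
  rw [he, pvFmtBin]
  have hdiv : (2 * (Y % (2^i)).toNat + r.toNat) / 2 = (Y % (2^i)).toNat := by omega
  have hmod : (2 * (Y % (2^i)).toNat + r.toNat) % 2 = r.toNat := by omega
  rw [hdiv, hmod]
  rcases hr with h | h <;> subst h <;> norm_num

theorem pvSubLoop_inv (a b : List Char)
    (ha : ∀ c ∈ a, c = '0' ∨ c = '1') (hb : ∀ c ∈ b, c = '0' ∨ c = '1')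
    (i : Nat) (hia : i ≤ a.length) (hib : i ≤ b.length)
    (b0 : Int) (hb0 : b0 = 0 ∨ b0 = 1) (sub : List Char) :
    pvSubLoop a b i (b0, sub) =
      (if pvBinVal (a.take i) - pvBinVal (b.take i) - b0 < 0 then 1 else 0,
       pvFmtBin i ((pvBinVal (a.take i) - pvBinVal (b.take i) - b0)% (2 ^ i)).toNat ++ sub) := by
  induction i generalizing b0 sub with
  | zero =>
    rcases hb0 with h | h <;> subst h <;>
      norm_num [pvSubLoop, pvBinVal, pvFmtBin]
  | succ i ih =>
    have hia' : i < a.length := by omega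
    have hib' : i < b.length := by omega
    have hta : a.take (i+1) = a.take i ++ [a[i]] := List.take_succ_eq_append_getElem hia'
    have htb : b.take (i+1) = b.take i ++ [b[i]] := List.take_succ_eq_append_getElem hib'
    have hga : a.getD i '0' = a[i] := List.getD_eq_getElem a '0' hia'
    have hgb : b.getD i '0' = b[i] := List.getD_eq_getElem b '0' hib'
    have hda : pvDigit a[i] = 0 ∨ pvDigit a[i] = 1 := by
      rcases ha a[i] (a.getElem_mem hia') with h | h <;> rw [h]
      · left; decide
      · right; decide
    have hdb : pvDigit b[i] = 0 ∨ pvDigit b[i] = 1 := by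
      rcases hb b[i] (b.getElem_mem hib') with h | h <;> rw [h]
      · left; decide
      · right; decide
    have hvA : pvBinVal (a.take (i+1)) - pvBinVal (b.take (i+1)) - b0
        = 2 * (pvBinVal (a.take i) - pvBinVal (b.take i)) + (pvDigit a[i] - pvDigit b[i] - b0) := by
      rw [hta, htb, pvBinVal_append, pvBinVal_append]
      simp only [pvDigit]; ring
    set X := pvBinVal (a.take i) - pvBinVal (b.take i) with hX
    rw [pvSubLoop]
    simp only [hga, hgb, hvA]
    set dd := pvDigit a[i] - pvDigit b[i] - b0 with hdd
    by_cases hpos : dd ≥ 0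
    · have hdd01 : dd = 0 ∨ dd = 1 := by
        rcases hda with h|h <;> rcases hdb with h'|h' <;> rcases hb0 with h''|h'' <;> omega
      have hstr : (PySem.Int.toStr dd).toList = [if dd = 1 then '1' else '0'] := by
        rcases hdd01 with h|h <;> rw [h] <;> decide
      rw [if_pos hpos, hstr, ih (by omega) (by omega) 0 (Or.inl rfl)]
      rw [show 2 * X + dd = 2 * (X - 0) + dd by ring, pvFmtBin_step i (X - 0) dd hdd01]
      simp only [Prod.mk.injEq]
      refine ⟨?_, by simp⟩
      rcases hdd01 with h|h <;> rw [h] <;> split_ifs <;> omega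
    · have hdd01 : dd + 2 = 0 ∨ dd + 2 = 1 := by
        rcases hda with h|h <;> rcases hdb with h'|h' <;> rcases hb0 with h''|h'' <;> omega
      have hstr : (PySem.Int.toStr (dd + 2)).toList = [if dd + 2 = 1 then '1' else '0'] := by
        rcases hdd01 with h|h
        · rw [show dd = -2 by omega]; decide
        · rw [show dd = -1 by omega]; decide
      rw [if_neg hpos, hstr, ih (by omega) (by omega) 1 (Or.inr rfl)]
      rw [show 2 * X + dd = 2 * (X - 1) + (dd + 2) by ring, pvFmtBin_step i (X - 1) (dd + 2) hdd01]
      simp only [Prod.mk.injEq]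
      refine ⟨?_, by simp⟩
      rcases hdd01 with h|h <;> split_ifs <;> omega

theorem pvRun_eq (la lb : List Char) (hlen : la.length = lb.length)
    (ha : ∀ c ∈ la, c = '0' ∨ c = '1') (hb : ∀ c ∈ lb, c = '0' ∨ c = '1') :
    (pvSubLoop la lb la.length (0, [])).2
      = pvFmtBin la.length ((pvBinVal la - pvBinVal lb)% (2 ^ la.length)).toNat := by
  rw [pvSubLoop_inv la lb ha hb la.length le_rfl (by omega) 0 (Or.inl rfl) [],
    List.take_of_length_le (le_of_eq rfl), List.take_of_length_le (le_of_eq hlen.symm)]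
  simp

-- ===== VERDICT (by name: the statement is the Claim_ definition above) =====
theorem sub_binary_num_spec : Claim_equal_sub_binary_num := by
  intro a b _ hpre
  unfold Pre_sub_binary_num at hpre
  simp only [Bool.and_eq_true, List.all_eq_true, Bool.or_eq_true, beq_iff_eq] at hpre
  obtain ⟨ha, hb⟩ := hpre
  show sub_binary_num a b = sub_binary_num_alt a b
  simp only [sub_binary_num, sub_binary_num_alt]
  by_cases h0 : max a.toList.length b.toList.length = 0
  · have ha0 : a.toList = [] := List.eq_nil_of_length_eq_zero (by omega)
    have hb0 : b.toList = [] := List.eq_nil_of_length_eq_zero (by omega)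
    rw [if_pos h0]
    simp [ha0, hb0, pvSubLoop]
    rfl
  · rw [if_neg h0, PySem.Int.mod_eq_emod_of_pos (by positivity), pvStrVal_eq a.toList ha,
      pvStrVal_eq b.toList hb]
    rcases Nat.lt_trichotomy a.toList.length b.toList.length with hlt | heq | hgt
    · rw [if_pos hlt, if_neg (by omega)]
      have hlen' : (List.replicate (b.toList.length - a.toList.length) '0' ++ a.toList).length
          = b.toList.length := by simp only [List.length_append, List.length_replicate]; omega
      have ha' : ∀ c ∈ List.replicate (b.toList.length - a.toList.length) '0' ++ a.toList,
          c = '0' ∨ c = '1' := by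
        intro c hc
        rcases List.mem_append.mp hc with h | h
        · exact Or.inl (List.eq_of_mem_replicate h)
        · exact ha c h
      rw [pvRun_eq _ _ (by rw [hlen']) ha' hb, pvBinVal_zeros_prefix, hlen']
      conv_lhs => rw [show b.toList.length = max a.toList.length b.toList.length from by omega]
    · rw [if_neg (by omega), if_neg (by omega), pvRun_eq a.toList b.toList heq ha hb]
      conv_lhs => rw [show a.toList.length = max a.toList.length b.toList.length from by omega]
    · rw [if_neg (by omega), if_pos hgt]
      have hlen' : (List.replicate (a.toList.length - b.toList.length) '0' ++ b.toList).length
          = a.toList.length := by simp only [List.length_append, List.length_replicate]; omega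
      have hb' : ∀ c ∈ List.replicate (a.toList.length - b.toList.length) '0' ++ b.toList,
          c = '0' ∨ c = '1' := by
        intro c hc
        rcases List.mem_append.mp hc with h | h
        · exact Or.inl (List.eq_of_mem_replicate h)
        · exact hb c h
      rw [pvRun_eq a.toList _ (by rw [hlen']) ha hb', pvBinVal_zeros_prefix]
      conv_lhs => rw [show a.toList.length = max a.toList.length b.toList.length from by omega]
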